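-- pv_equiv track=rewrite | github.com/joelcato/chess_puzzles2 | scripts/find_all_solutions.py | find_branch_points
-- ===== SOURCE A (Python) =====
-- from collections import defaultdict
--
-- def find_branch_points(solutions):
--     """
--     Return a list of 0-based player-move indices where independent branching
--     occurs — i.e. two solutions share the same prefix up to that index but
--     then diverge.  Player moves are at even positions (0, 2, 4, ...).
--     """
--     if len(solutions) <= 1:
--         return []
--     branch_points = []
--     max_len = max(len(s) for s in solutions)
--     for i in range(0, max_len, 2):  # only player-move positions
--         # Group solutions by their prefix up to (not including) position i.
--         groups = defaultdict(set)
--         for s in solutions: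
--             if len(s) > i:
--                 prefix = tuple(s[:i])
--                 groups[prefix].add(s[i])
--         # A real branch at i exists if any prefix group has more than one choice.
--         if any(len(choices) > 1 for choices in groups.values()):
--             branch_points.append(i)
--     return branch_points
-- ===== SOURCE B (Python) =====
-- def find_branch_points(solutions):
--     """Alternative algorithm: sort the solutions once; two solutions that share
--     a prefix and diverge at i sandwich an adjacent sorted pair diverging at the
--     same i, so the branch points are exactly the even first-divergence indices
--     of adjacent sorted pairs, returned in increasing order."""
--     ordered = sorted(solutions)
--     pts = set()
--     for idx in range(len(ordered) - 1):
--         s, t = ordered[idx], ordered[idx + 1]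
--         i = next((x for x in range(min(len(s), len(t))) if s[x] != t[x]), None)
--         if i is not None and i % 2 == 0:
--             pts.add(i)
--     return sorted(pts)
-- ===== Notes on version B (the rewrite author's own statement) =====
-- stated objective: alternative
-- what changed: Instead of scanning every even position and re-grouping all solutions by prefix with a dict of sets, B sorts the solutions once and collects the even first-divergence indices of adjacent sorted pairs.
import Mathlib
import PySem

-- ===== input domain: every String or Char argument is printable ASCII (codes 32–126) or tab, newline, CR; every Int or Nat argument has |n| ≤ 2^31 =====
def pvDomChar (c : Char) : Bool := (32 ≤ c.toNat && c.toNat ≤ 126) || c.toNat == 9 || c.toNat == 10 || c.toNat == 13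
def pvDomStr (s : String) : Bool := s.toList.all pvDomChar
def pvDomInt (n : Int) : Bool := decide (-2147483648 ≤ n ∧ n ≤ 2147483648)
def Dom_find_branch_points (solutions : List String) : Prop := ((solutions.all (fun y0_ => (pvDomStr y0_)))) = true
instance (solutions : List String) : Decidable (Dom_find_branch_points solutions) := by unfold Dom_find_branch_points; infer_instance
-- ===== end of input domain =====

-- B replaces A's per-even-position re-grouping of all solutions by prefix (dict of sets)
-- with one sort followed by a scan of adjacent pairs, collecting their even
-- first-divergence indices; objective: alternative algorithm (same answers, no speed claim).

-- ===== PORT A =====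
def find_branch_points (solutions : List String) : List Int :=
  if solutions.length ≤ 1 then []
  else
    -- max(len(s) for s in solutions): solutions is nonempty here, so max? is `some`; getD only totalizes
    let max_len : Int := (PySem.List.max? (solutions.map (fun s => PySem.Str.len s)) (fun x => x)).getD 0
    (PySem.List.pyRange 0 max_len 2).foldl (fun branch_points i =>
      let groups : PySem.Dict (List Char) (PySem.Set Char) :=
        solutions.foldl (fun g s =>
          if PySem.Str.len s > i then
            -- groups[tuple(s[:i])].add(s[i]); len(s) > i ≥ 0 makes s[i] in range, pyGetD is the total form
            g.modify (PySem.List.slice s.toList none (some i)) PySem.Set.empty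
              (fun choices => choices.add (PySem.List.pyGetD s.toList i ' '))
          else g) PySem.Dict.empty
      if groups.values.any (fun choices => decide (1 < PySem.Set.len choices)) then
        branch_points ++ [i]
      else branch_points) []

-- ===== PORT B =====
def find_branch_points_alt (solutions : List String) : List Int :=
  let ordered := PySem.List.sorted solutions (fun x => x)
  let pts : PySem.Set Int :=
    (PySem.List.pyRange 0 ((ordered.length : Int) - 1) 1).foldl (fun pts idx =>
      let s := PySem.List.pyGetD ordered idx ""
      let t := PySem.List.pyGetD ordered (idx + 1) ""
      -- i = next((x for x in range(min(len(s), len(t))) if s[x] != t[x]), None)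
      match (PySem.List.pyRange 0 (min (PySem.Str.len s) (PySem.Str.len t)) 1).find?
          (fun x => PySem.List.pyGetD s.toList x ' ' != PySem.List.pyGetD t.toList x ' ') with
      | some i => if PySem.Int.mod i 2 == 0 then PySem.Set.add pts i else pts
      | none => pts) PySem.Set.empty
  PySem.List.sorted pts (fun x => x)

-- ===== PRECONDITION & SPEC =====
def Spec_find_branch_points (solutions : List String) (out : List Int) : Prop := out = find_branch_points_alt solutions
instance (solutions : List String) (out : List Int) : Decidable (Spec_find_branch_points solutions out) := by unfold Spec_find_branch_points; infer_instance

-- ===== CLAIM (what is proved, stated in full; the proofs are below) =====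
def Claim_equal_find_branch_points : Prop := ∀ (solutions : List String), Dom_find_branch_points solutions → Spec_find_branch_points solutions (find_branch_points solutions)

-- ===== LEMMAS AND PROOFS =====

-- Two char-lists agree strictly before i and are both defined and different at i.
def CondPair (s t : List Char) (i : Int) : Prop :=
  i < (s.length : Int) ∧ i < (t.length : Int) ∧
    s.take i.toNat = t.take i.toNat ∧ s[i.toNat]? ≠ t[i.toNat]?

-- Some two solutions share their prefix below i and diverge at i.
def BranchAt (sols : List String) (i : Int) : Prop :=
  ∃ s ∈ sols, ∃ t ∈ sols, 0 ≤ i ∧ CondPair s.toList t.toList i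

-- generic: membership through a fold whose step adds elements described by Q
theorem mem_foldl_step {α β : Type} (l : List β) (step : List α → β → List α)
    (Q : β → α → Prop)
    (h : ∀ a k y, y ∈ step a k ↔ y ∈ a ∨ Q k y) (acc : List α) (y : α) :
    y ∈ l.foldl step acc ↔ y ∈ acc ∨ ∃ k ∈ l, Q k y := by
  induction l generalizing acc with
  | nil => simp
  | cons x xs ih =>
    simp only [List.foldl_cons, ih, h, List.mem_cons]
    constructor
    · rintro ((hy | hq) | ⟨k, hk, hq⟩)
      · exact Or.inl hy
      · exact Or.inr ⟨x, Or.inl rfl, hq⟩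
      · exact Or.inr ⟨k, Or.inr hk, hq⟩
    · rintro (hy | ⟨k, (rfl | hk), hq⟩)
      · exact Or.inl (Or.inl hy)
      · exact Or.inl (Or.inr hq)
      · exact Or.inr ⟨k, hk, hq⟩

theorem nodup_foldl_step {α β : Type} (l : List β) (step : List α → β → List α)
    (h : ∀ a k, a.Nodup → (step a k).Nodup) (acc : List α) (hacc : acc.Nodup) :
    (l.foldl step acc).Nodup := by
  induction l generalizing acc with
  | nil => exact hacc
  | cons x xs ih => exact ih _ (h _ _ hacc)

theorem find?_range_eq_some_iff (q : Nat → Bool) (M j : Nat) :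
    List.find? q (List.range M) = some j ↔ (q j ∧ j < M ∧ ∀ x < j, ¬ q x) := by
  rw [List.find?_eq_some_iff_getElem]
  simp only [List.getElem_range, List.length_range]
  constructor
  · rintro ⟨hq, k, hk, rfl, hlt⟩
    exact ⟨hq, hk, fun x hx => by simpa using hlt x hx⟩
  · rintro ⟨hq, hj, hlt⟩
    exact ⟨hq, j, hj, rfl, fun x hx => by simpa using hlt x hx⟩

theorem findDiff_eq_some_iff (s t : List Char) (i : Int) :
    ((PySem.List.pyRange 0 (min (s.length : Int) (t.length : Int)) 1).find?
        (fun x => PySem.List.pyGetD s x ' ' != PySem.List.pyGetD t x ' ') = some i)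
      ↔ (0 ≤ i ∧ CondPair s t i) := by
  have hmin : (min (s.length : Int) (t.length : Int)) = ((min s.length t.length : Nat) : Int) := by
    push_cast; rfl
  rw [hmin, PySem.List.pyRange_zero_natCast, List.find?_map, Option.map_eq_some_iff]
  constructor
  · rintro ⟨j, hj, rfl⟩
    rw [find?_range_eq_some_iff] at hj
    obtain ⟨hq, hjM, hlt⟩ := hj
    have hjs : j < s.length := lt_of_lt_of_le hjM (min_le_left _ _)
    have hjt : j < t.length := lt_of_lt_of_le hjM (min_le_right _ _)
    simp only [Function.comp, PySem.List.pyGetD_natCast, bne_iff_ne, ne_eq] at hq hlt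
    refine ⟨Int.natCast_nonneg j, ?_, ?_, ?_, ?_⟩
    · exact_mod_cast hjs
    · exact_mod_cast hjt
    · apply List.ext_getElem
      · simp only [List.length_take]; omega
      · intro x h1 h2
        simp only [List.getElem_take]
        have hx : x < j := by simp only [List.length_take] at h1; omega
        have := hlt x hx
        rw [List.getD_eq_getElem s ' ' (by omega), List.getD_eq_getElem t ' ' (by omega)] at this
        simpa using this
    · simp only [Int.toNat_natCast]
      rw [List.getElem?_eq_getElem hjs, List.getElem?_eq_getElem hjt]
      rw [List.getD_eq_getElem s ' ' hjs, List.getD_eq_getElem t ' ' hjt] at hq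
      simpa using hq
  · rintro ⟨hi, hs, ht, htake, hch⟩
    refine ⟨i.toNat, ?_, Int.toNat_of_nonneg hi⟩
    rw [find?_range_eq_some_iff]
    have hjs : i.toNat < s.length := by omega
    have hjt : i.toNat < t.length := by omega
    refine ⟨?_, by omega, ?_⟩
    · simp only [Function.comp, PySem.List.pyGetD_natCast, bne_iff_ne, ne_eq]
      rw [List.getD_eq_getElem s ' ' hjs, List.getD_eq_getElem t ' ' hjt]
      rw [List.getElem?_eq_getElem hjs, List.getElem?_eq_getElem hjt] at hch
      simpa using hch
    · intro x hx
      simp only [Function.comp, PySem.List.pyGetD_natCast, bne_iff_ne, ne_eq, not_not]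
      rw [List.getD_eq_getElem s ' ' (by omega), List.getD_eq_getElem t ' ' (by omega)]
      have h := congrArg (fun l => l[x]?) htake
      simp only [List.getElem?_take, if_pos hx] at h
      rw [List.getElem?_eq_getElem (by omega), List.getElem?_eq_getElem (by omega)] at h
      simpa using h

theorem getD_groups (l : List String) (i : Int) (d : PySem.Dict (List Char) (PySem.Set Char)) (p : List Char) :
    (l.foldl (fun g s =>
        g.modify (PySem.List.slice s.toList none (some i)) PySem.Set.empty
          (fun choices => choices.add (PySem.List.pyGetD s.toList i ' '))) d).getD p PySem.Set.empty
      = PySem.Set.update (d.getD p PySem.Set.empty)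
          ((l.filter (fun s => PySem.List.slice s.toList none (some i) == p)).map
            (fun s => PySem.List.pyGetD s.toList i ' ')) := by
  induction l generalizing d with
  | nil => simp [PySem.Set.update]
  | cons x xs ih =>
    simp only [List.foldl_cons, List.filter_cons]
    rw [ih, PySem.Dict.getD_modify]
    by_cases h : PySem.List.slice x.toList none (some i) = p
    · rw [if_pos h.symm, if_pos (show (PySem.List.slice x.toList none (some i) == p) = true by simpa using h),
        List.map_cons, PySem.Set.update_cons, h]
    · rw [if_neg (fun hh => h hh.symm),
        if_neg (show ¬ (PySem.List.slice x.toList none (some i) == p) = true by simpa using h)]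

theorem two_mem_iff {α : Type} [BEq α] [LawfulBEq α] (X : List α) :
    1 < PySem.Set.len (PySem.Set.ofList X) ↔ ∃ a ∈ X, ∃ b ∈ X, a ≠ b := by
  have hnd : (PySem.Set.ofList X).Nodup := PySem.Set.nodup_ofList X
  have hm : ∀ y, y ∈ PySem.Set.ofList X ↔ y ∈ X := fun y => PySem.Set.mem_ofList X y
  rw [show PySem.Set.len (PySem.Set.ofList X) = ((PySem.Set.ofList X).length : Int) from rfl]
  constructor
  · intro hlen
    have h1 : 1 < (PySem.Set.ofList X).length := by exact_mod_cast hlen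
    refine ⟨(PySem.Set.ofList X)[0], (hm _).1 (List.getElem_mem _),
            (PySem.Set.ofList X)[1], (hm _).1 (List.getElem_mem _), ?_⟩
    intro heq
    have := (List.Nodup.getElem_inj_iff hnd).1 heq
    omega
  · rintro ⟨a, ha, b, hb, hne⟩
    by_contra hlen
    have h1 : (PySem.Set.ofList X).length ≤ 1 := by omega
    obtain ⟨ia, hia, haa⟩ := List.getElem_of_mem ((hm a).2 ha)
    obtain ⟨ib, hib, hbb⟩ := List.getElem_of_mem ((hm b).2 hb)
    have : ia = ib := by omega
    exact hne (by rw [← haa, ← hbb]; congr 1)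

theorem condA_iff (sols : List String) (i : Int) (hi : 0 ≤ i) :
    ((sols.foldl (fun g s =>
        if PySem.Str.len s > i then
          g.modify (PySem.List.slice s.toList none (some i)) PySem.Set.empty
            (fun choices => choices.add (PySem.List.pyGetD s.toList i ' '))
        else g) PySem.Dict.empty).values.any
          (fun choices => decide (1 < PySem.Set.len choices)) = true)
      ↔ BranchAt sols i := by
  rw [PySem.List.foldl_ite_eq_foldl_filter (fun s => PySem.Str.len s > i)
      (fun g s => g.modify (PySem.List.slice s.toList none (some i)) PySem.Set.empty
        (fun choices => choices.add (PySem.List.pyGetD s.toList i ' '))) sols PySem.Dict.empty]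
  have hnd : ((sols.filter (fun s => decide (PySem.Str.len s > i))).foldl
      (fun g s => g.modify (PySem.List.slice s.toList none (some i)) PySem.Set.empty
        (fun choices => choices.add (PySem.List.pyGetD s.toList i ' '))) PySem.Dict.empty).keys.Nodup := by
    exact PySem.Dict.nodup_keys_foldl_modify_key _ _ _ _ _ PySem.Dict.nodup_keys_empty
  rw [PySem.Dict.values_eq_map_keys _ hnd PySem.Set.empty, List.any_map,
      PySem.Dict.keys_foldl_modify_key, PySem.Dict.keys_empty, PySem.Set.update_nil_left,
      List.any_eq_true]
  have hG : ∀ p : List Char,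
      ((sols.filter (fun s => decide (PySem.Str.len s > i))).foldl
        (fun g s => g.modify (PySem.List.slice s.toList none (some i)) PySem.Set.empty
          (fun choices => choices.add (PySem.List.pyGetD s.toList i ' '))) PySem.Dict.empty).getD p PySem.Set.empty
      = PySem.Set.ofList (((sols.filter (fun s => decide (PySem.Str.len s > i))).filter
          (fun s => PySem.List.slice s.toList none (some i) == p)).map
            (fun s => PySem.List.pyGetD s.toList i ' ')) := by
    intro p
    rw [getD_groups, PySem.Dict.getD_empty]
    exact PySem.Set.update_nil_left _
  constructor
  · rintro ⟨p, hp, hdec⟩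
    simp only [Function.comp_apply, decide_eq_true_eq] at hdec
    rw [hG p, two_mem_iff] at hdec
    obtain ⟨a, ha, b, hb, hab⟩ := hdec
    simp only [List.mem_map, List.mem_filter, decide_eq_true_eq, beq_iff_eq] at ha hb
    obtain ⟨s, ⟨⟨hsmem, hslen⟩, hskey⟩, rfl⟩ := ha
    obtain ⟨t, ⟨⟨htmem, htlen⟩, htkey⟩, rfl⟩ := hb
    rw [PySem.Str.len_eq] at hslen htlen
    refine ⟨s, hsmem, t, htmem, hi, hslen, htlen, ?_, ?_⟩
    · have := hskey.trans htkey.symm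
      rwa [PySem.List.slice_to _ hi, PySem.List.slice_to _ hi] at this
    · rw [List.getElem?_eq_getElem (by omega), List.getElem?_eq_getElem (by omega)]
      rw [PySem.List.pyGetD_eq_getElem _ ' ' hi (by omega), PySem.List.pyGetD_eq_getElem _ ' ' hi (by omega)] at hab
      simpa using hab
  · rintro ⟨s, hsmem, t, htmem, -, hslen, htlen, htake, hch⟩
    refine ⟨PySem.List.slice s.toList none (some i), ?_, ?_⟩
    · rw [PySem.Set.mem_ofList]
      exact List.mem_map_of_mem (List.mem_filter.2 ⟨hsmem, by simp only [decide_eq_true_eq, PySem.Str.len_eq]; omega⟩)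
    · simp only [Function.comp_apply, decide_eq_true_eq]
      rw [hG, two_mem_iff]
      have hkey : PySem.List.slice s.toList none (some i) = PySem.List.slice t.toList none (some i) := by
        rw [PySem.List.slice_to _ hi, PySem.List.slice_to _ hi]; exact htake
      refine ⟨PySem.List.pyGetD s.toList i ' ', ?_, PySem.List.pyGetD t.toList i ' ', ?_, ?_⟩
      · exact List.mem_map_of_mem (List.mem_filter.2 ⟨List.mem_filter.2 ⟨hsmem, by simp only [decide_eq_true_eq, PySem.Str.len_eq]; omega⟩, by simp⟩)
      · exact List.mem_map_of_mem (List.mem_filter.2 ⟨List.mem_filter.2 ⟨htmem, by simp only [decide_eq_true_eq, PySem.Str.len_eq]; omega⟩, by simp [hkey]⟩)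
      · rw [PySem.List.pyGetD_eq_getElem _ ' ' hi (by omega), PySem.List.pyGetD_eq_getElem _ ' ' hi (by omega)]
        rw [List.getElem?_eq_getElem (by omega), List.getElem?_eq_getElem (by omega)] at hch
        simpa using hch

theorem condPair_symm {s t : List Char} {i : Int} (h : CondPair s t i) : CondPair t s i :=
  ⟨h.2.1, h.1, h.2.2.1.symm, h.2.2.2.symm⟩

-- lexicographically between two lists that share their first n entries: same prefix, same length bound
theorem take_interval (n : Nat) : ∀ (u w v : List Char), ¬ (w < u) → ¬ (v < w) →
    u.take n = v.take n → n < u.length → n < v.length →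
    w.take n = u.take n ∧ n < w.length := by
  induction n with
  | zero =>
    intro u w v huw _ _ hu _
    refine ⟨by simp, ?_⟩
    cases w with
    | nil =>
      cases u with
      | nil => simp at hu
      | cons cu u' => exact absurd (List.nil_lt_cons _ _) huw
    | cons cw w' => simp
  | succ n ih =>
    intro u w v huw hwv htake hu hv
    cases u with
    | nil => simp at hu
    | cons cu u' =>
      cases v with
      | nil => simp at hv
      | cons cv v' =>
        rw [List.take_succ_cons, List.take_succ_cons] at htake
        have hcv : cu = cv := List.head_eq_of_cons_eq htake
        have htake' : u'.take n = v'.take n := List.tail_eq_of_cons_eq htake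
        cases w with
        | nil => exact absurd (List.nil_lt_cons _ _) huw
        | cons cw w' =>
          rw [List.cons_lt_cons_iff] at huw hwv
          subst hcv
          have h1 : ¬ cw < cu := fun h => huw (Or.inl h)
          have h2 : ¬ cu < cw := fun h => hwv (Or.inl h)
          have hcw : cw = cu := le_antisymm (not_lt.1 h2) (not_lt.1 h1)
          subst hcw
          have h3 : ¬ w' < u' := fun h => huw (Or.inr ⟨rfl, h⟩)
          have h4 : ¬ v' < w' := fun h => hwv (Or.inr ⟨rfl, h⟩)
          obtain ⟨ht, hl⟩ := ih u' w' v' h3 h4 htake' (by simpa using hu) (by simpa using hv)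
          refine ⟨by simp [List.take_succ_cons, ht], by simpa using hl⟩


theorem exists_adjacent (L : List String) (hs : L.Pairwise (· ≤ ·)) (i : Int) (hi : 0 ≤ i) :
    ∀ (d a b : Nat), b - a = d → a < b → b < L.length →
      CondPair (L.getD a "").toList (L.getD b "").toList i →
      ∃ c, c + 1 < L.length ∧ CondPair (L.getD c "").toList (L.getD (c+1) "").toList i := by
  intro d
  induction d using Nat.strong_induction_on with
  | _ d ih =>
    intro a b hd hab hb hcond
    by_cases hadj : b = a + 1
    · subst hadj
      exact ⟨a, hb, hcond⟩
    · have hmb : a + 1 < b := by omega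
      have hle1 : L.getD a "" ≤ L.getD (a+1) "" := by
        rw [List.getD_eq_getElem L "" (by omega), List.getD_eq_getElem L "" (by omega)]
        exact List.pairwise_iff_getElem.1 hs a (a+1) (by omega) (by omega) (by omega)
      have hle2 : L.getD (a+1) "" ≤ L.getD b "" := by
        rw [List.getD_eq_getElem L "" (by omega), List.getD_eq_getElem L "" (by omega)]
        exact List.pairwise_iff_getElem.1 hs (a+1) b (by omega) (by omega) (by omega)
      have h1 : ¬ ((L.getD (a+1) "").toList < (L.getD a "").toList) := by
        rw [String.le_iff_toList_le] at hle1; exact not_lt.2 hle1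
      have h2 : ¬ ((L.getD b "").toList < (L.getD (a+1) "").toList) := by
        rw [String.le_iff_toList_le] at hle2; exact not_lt.2 hle2
      obtain ⟨hia, hib, htake, hch⟩ := hcond
      have hna : i.toNat < (L.getD a "").toList.length := by omega
      have hnb : i.toNat < (L.getD b "").toList.length := by omega
      obtain ⟨hmtake, hmlen⟩ := take_interval i.toNat _ _ _ h1 h2 htake hna hnb
      by_cases hchar : ((L.getD a "").toList)[i.toNat]? = ((L.getD (a+1) "").toList)[i.toNat]?
      · refine ih (b - (a+1)) (by omega) (a+1) b rfl hmb hb ?_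
        exact ⟨by omega, hib, hmtake.trans htake, by rw [← hchar]; exact hch⟩
      · exact ⟨a, by omega, hia, by omega, hmtake.symm, hchar⟩

theorem mem_pts_iff (sols : List String) (i : Int) :
    i ∈ (PySem.List.pyRange 0 (((PySem.List.sorted sols (fun x => x)).length : Int) - 1) 1).foldl
          (fun pts idx =>
            match (PySem.List.pyRange 0 (min (PySem.Str.len (PySem.List.pyGetD (PySem.List.sorted sols (fun x => x)) idx ""))
                      (PySem.Str.len (PySem.List.pyGetD (PySem.List.sorted sols (fun x => x)) (idx + 1) ""))) 1).find?
                (fun x => PySem.List.pyGetD (PySem.List.pyGetD (PySem.List.sorted sols (fun x => x)) idx "").toList x ' '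
                    != PySem.List.pyGetD (PySem.List.pyGetD (PySem.List.sorted sols (fun x => x)) (idx + 1) "").toList x ' ') with
            | some i => if PySem.Int.mod i 2 == 0 then PySem.Set.add pts i else pts
            | none => pts) PySem.Set.empty
      ↔ (PySem.Int.mod i 2 = 0 ∧ BranchAt sols i) := by
  have hperm := PySem.List.sorted_perm sols (fun x => x) false
  have hsort : (PySem.List.sorted sols (fun x => x)).Pairwise (· ≤ ·) :=
    PySem.List.sorted_pairwise sols (fun x => x)
  set L := PySem.List.sorted sols (fun x => x) with hL
  have hstep : ∀ (a : List Int) (idx : Int) (y : Int),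
      y ∈ (match (PySem.List.pyRange 0 (min (PySem.Str.len (PySem.List.pyGetD L idx ""))
                (PySem.Str.len (PySem.List.pyGetD L (idx + 1) ""))) 1).find?
            (fun x => PySem.List.pyGetD (PySem.List.pyGetD L idx "").toList x ' '
                != PySem.List.pyGetD (PySem.List.pyGetD L (idx + 1) "").toList x ' ') with
          | some i => if PySem.Int.mod i 2 == 0 then PySem.Set.add a i else a
          | none => a)
        ↔ y ∈ a ∨ (((PySem.List.pyRange 0 (min (PySem.Str.len (PySem.List.pyGetD L idx ""))
                (PySem.Str.len (PySem.List.pyGetD L (idx + 1) ""))) 1).find?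
            (fun x => PySem.List.pyGetD (PySem.List.pyGetD L idx "").toList x ' '
                != PySem.List.pyGetD (PySem.List.pyGetD L (idx + 1) "").toList x ' ') = some y)
          ∧ PySem.Int.mod y 2 = 0) := by
    intro a idx y
    rcases hfind : (PySem.List.pyRange 0 (min (PySem.Str.len (PySem.List.pyGetD L idx ""))
        (PySem.Str.len (PySem.List.pyGetD L (idx + 1) ""))) 1).find?
        (fun x => PySem.List.pyGetD (PySem.List.pyGetD L idx "").toList x ' '
            != PySem.List.pyGetD (PySem.List.pyGetD L (idx + 1) "").toList x ' ') with _ | i0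
    · simp
    · have hred : (match some i0 with
          | some i => if PySem.Int.mod i 2 == 0 then PySem.Set.add a i else a
          | none => a)
          = if (PySem.Int.mod i0 2 == 0) = true then PySem.Set.add a i0 else a := rfl
      by_cases hmod : PySem.Int.mod i0 2 = 0
      · rw [hred, if_pos (by simpa using hmod), PySem.Set.mem_add]
        constructor
        · rintro (hy | rfl)
          · exact Or.inl hy
          · exact Or.inr ⟨rfl, hmod⟩
        · rintro (hy | ⟨heq, hm⟩)
          · exact Or.inl hy
          · exact Or.inr (Option.some_inj.1 heq).symm
      · rw [hred, if_neg (by simpa using hmod)]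
        constructor
        · exact Or.inl
        · rintro (hy | ⟨heq, hm⟩)
          · exact hy
          · exact absurd hm ((Option.some_inj.1 heq) ▸ hmod)
  rw [mem_foldl_step _ _ _ (fun a idx y => hstep a idx y) PySem.Set.empty i]
  simp only [PySem.Str.len_eq, findDiff_eq_some_iff, PySem.Set.empty]
  rw [show (i ∈ ([] : List Int)) ↔ False by simp]
  simp only [false_or, PySem.List.mem_pyRange_one]
  constructor
  · rintro ⟨idx, ⟨hx0, hxn⟩, ⟨hi0, hcond⟩, hmod⟩
    rw [PySem.List.pyGetD_eq_getElem _ _ hx0 (by omega),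
        PySem.List.pyGetD_eq_getElem _ _ (by omega : (0:Int) ≤ idx + 1) (by omega)] at hcond
    have hlt1 : idx.toNat < L.length := by omega
    have hlt2 : (idx+1).toNat < L.length := by omega
    have h1 : L[idx.toNat]'hlt1 ∈ sols := hperm.mem_iff.1 (List.getElem_mem hlt1)
    have h2 : L[(idx+1).toNat]'hlt2 ∈ sols := hperm.mem_iff.1 (List.getElem_mem hlt2)
    exact ⟨hmod, _, h1, _, h2, hi0, hcond⟩
  · rintro ⟨hmod, s, hs, t, ht, hi0, hcond⟩
    obtain ⟨ja, hja, rfl⟩ := List.getElem_of_mem (hperm.mem_iff.2 hs)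
    obtain ⟨jb, hjb, rfl⟩ := List.getElem_of_mem (hperm.mem_iff.2 ht)
    have hne : ja ≠ jb := by
      intro h; subst h; exact hcond.2.2.2 rfl
    have key : ∃ c, c + 1 < L.length ∧ CondPair (L.getD c "").toList (L.getD (c+1) "").toList i := by
      rcases Nat.lt_or_ge ja jb with hlt | hge
      · refine exists_adjacent L hsort i hi0 (jb - ja) ja jb rfl hlt hjb ?_
        rw [List.getD_eq_getElem L "" (by omega), List.getD_eq_getElem L "" (by omega)]
        exact hcond
      · have hlt : jb < ja := by omega
        refine exists_adjacent L hsort i hi0 (ja - jb) jb ja rfl hlt hja ?_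
        rw [List.getD_eq_getElem L "" (by omega), List.getD_eq_getElem L "" (by omega)]
        exact condPair_symm hcond
    obtain ⟨c, hc, hcp⟩ := key
    refine ⟨(c : Int), ⟨by omega, by omega⟩, ⟨hi0, ?_⟩, hmod⟩
    rw [PySem.List.pyGetD_eq_getElem _ _ (by omega) (by omega),
        PySem.List.pyGetD_eq_getElem _ _ (by omega : (0:Int) ≤ (c:Int) + 1) (by omega)]
    rw [List.getD_eq_getElem L "" (by omega), List.getD_eq_getElem L "" (by omega)] at hcp
    have e1 : ((c : Int)).toNat = c := by omega
    have e2 : ((c : Int) + 1).toNat = c + 1 := by omega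
    simp only [e1, e2]
    exact hcp

theorem nodup_pts (sols : List String) :
    ((PySem.List.pyRange 0 (((PySem.List.sorted sols (fun x => x)).length : Int) - 1) 1).foldl
        (fun pts idx =>
          match (PySem.List.pyRange 0 (min (PySem.Str.len (PySem.List.pyGetD (PySem.List.sorted sols (fun x => x)) idx ""))
                    (PySem.Str.len (PySem.List.pyGetD (PySem.List.sorted sols (fun x => x)) (idx + 1) ""))) 1).find?
              (fun x => PySem.List.pyGetD (PySem.List.pyGetD (PySem.List.sorted sols (fun x => x)) idx "").toList x ' '
                  != PySem.List.pyGetD (PySem.List.pyGetD (PySem.List.sorted sols (fun x => x)) (idx + 1) "").toList x ' ') with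
          | some i => if PySem.Int.mod i 2 == 0 then PySem.Set.add pts i else pts
          | none => pts) PySem.Set.empty : List Int).Nodup := by
  refine nodup_foldl_step _ _ ?_ _ List.nodup_nil
  intro a idx ha
  rcases (PySem.List.pyRange 0 (min (PySem.Str.len (PySem.List.pyGetD (PySem.List.sorted sols (fun x => x)) idx ""))
      (PySem.Str.len (PySem.List.pyGetD (PySem.List.sorted sols (fun x => x)) (idx + 1) ""))) 1).find?
      (fun x => PySem.List.pyGetD (PySem.List.pyGetD (PySem.List.sorted sols (fun x => x)) idx "").toList x ' '
          != PySem.List.pyGetD (PySem.List.pyGetD (PySem.List.sorted sols (fun x => x)) (idx + 1) "").toList x ' ') with _ | i0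
  · exact ha
  · by_cases hmod : (PySem.Int.mod i0 2 == 0) = true
    · rw [show (match some i0 with
          | some i => if PySem.Int.mod i 2 == 0 then PySem.Set.add a i else a
          | none => a)
          = if (PySem.Int.mod i0 2 == 0) = true then PySem.Set.add a i0 else a from rfl,
        if_pos hmod]
      exact PySem.Set.nodup_add a i0 ha
    · rw [show (match some i0 with
          | some i => if PySem.Int.mod i 2 == 0 then PySem.Set.add a i else a
          | none => a)
          = if (PySem.Int.mod i0 2 == 0) = true then PySem.Set.add a i0 else a from rfl,
        if_neg hmod]
      exact ha

theorem branchAt_lt_max (sols : List String) (i : Int) (h : BranchAt sols i) (hne : sols ≠ []) :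
    i < (PySem.List.max? (sols.map (fun s => PySem.Str.len s)) (fun x => x)).getD 0 := by
  obtain ⟨s, hs, t, ht, hi0, hcond⟩ := h
  rcases hmax : PySem.List.max? (sols.map (fun s => PySem.Str.len s)) (fun x => x) with _ | m
  · rw [PySem.List.max?_eq_none_iff] at hmax
    exact absurd (List.map_eq_nil_iff.1 hmax) hne
  · have hle := PySem.List.max?_isMax hmax (PySem.Str.len s) (List.mem_map_of_mem hs)
    have : i < PySem.Str.len s := by rw [PySem.Str.len_eq]; exact hcond.1
    simpa using lt_of_lt_of_le this hle

theorem pairwise_lt_pyRange_two (a b : Int) :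
    (PySem.List.pyRange a b 2).Pairwise (· < ·) := by
  rw [PySem.List.pyRange_of_pos a b (by omega)]
  refine List.pairwise_map.2 ?_
  exact List.pairwise_lt_range.imp (fun h => by omega)

-- ===== VERDICT (by name: the statement is the Claim_ definition above) =====
theorem find_branch_points_spec : Claim_equal_find_branch_points := by
  intro sols _
  show find_branch_points sols = find_branch_points_alt sols
  have hnd := nodup_pts sols
  have hmem := mem_pts_iff sols
  simp only [find_branch_points, find_branch_points_alt]
  by_cases hle : sols.length ≤ 1
  · rw [if_pos hle]
    have hpts : ((PySem.List.pyRange 0 (((PySem.List.sorted sols (fun x => x)).length : Int) - 1) 1).foldl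
        (fun pts idx =>
          match (PySem.List.pyRange 0 (min (PySem.Str.len (PySem.List.pyGetD (PySem.List.sorted sols (fun x => x)) idx ""))
                    (PySem.Str.len (PySem.List.pyGetD (PySem.List.sorted sols (fun x => x)) (idx + 1) ""))) 1).find?
              (fun x => PySem.List.pyGetD (PySem.List.pyGetD (PySem.List.sorted sols (fun x => x)) idx "").toList x ' '
                  != PySem.List.pyGetD (PySem.List.pyGetD (PySem.List.sorted sols (fun x => x)) (idx + 1) "").toList x ' ') with
          | some i => if PySem.Int.mod i 2 == 0 then PySem.Set.add pts i else pts
          | none => pts) PySem.Set.empty : List Int) = [] := by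
      rw [List.eq_nil_iff_forall_not_mem]
      intro x hx
      obtain ⟨-, s, hs, t, ht, -, hcond⟩ := (hmem x).1 hx
      obtain ⟨ja, hja, rfl⟩ := List.getElem_of_mem hs
      obtain ⟨jb, hjb, rfl⟩ := List.getElem_of_mem ht
      have : ja ≠ jb := by
        intro h; subst h; exact hcond.2.2.2 rfl
      omega
    rw [hpts]
    rfl
  · rw [if_neg hle]
    rw [PySem.List.foldl_append_ite_eq_filter]
    rw [List.nil_append]
    symm
    apply PySem.List.sorted_eq_of_perm_of_pairwise_lt
    · rw [List.perm_ext_iff_of_nodup (List.Pairwise.filter _ (pairwise_lt_pyRange_two 0 _) |>.imp ne_of_lt) hnd]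
      intro x
      rw [hmem x, List.mem_filter, PySem.List.mem_pyRange_iff_of_pos (by omega : (0:Int) < 2) x]
      constructor
      · rintro ⟨⟨hx0, hxm, hdvd⟩, hc⟩
        rw [decide_eq_true_eq, condA_iff sols x hx0] at hc
        refine ⟨?_, hc⟩
        rw [PySem.Int.mod_eq_zero_iff_dvd]
        simpa using hdvd
      · rintro ⟨hmod, hbr⟩
        have hx0 : 0 ≤ x := by
          obtain ⟨-, -, -, -, h0, -⟩ := hbr
          exact h0
        have hne : sols ≠ [] := by
          intro h; rw [h] at hle; simp at hle
        refine ⟨⟨hx0, branchAt_lt_max sols x hbr hne, by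
          rw [PySem.Int.mod_eq_zero_iff_dvd] at hmod; simpa using hmod⟩, ?_⟩
        rw [decide_eq_true_eq, condA_iff sols x hx0]
        exact hbr
    · exact List.Pairwise.filter _ (pairwise_lt_pyRange_two 0 _)
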